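-- pv_equiv track=rewrite | github.com/MrBrantCode/unitest_baseline | mut_generate/mist_train_cf/cf_57061/solution.py | composite_gcd
-- ===== SOURCE A (Python) =====
-- import math
--
-- def composite_gcd(start, end):
--     """
--     This function calculates the greatest common divisor of all composite numbers within a specified range.
--
--     Parameters:
--     start (int): The start of the range (inclusive)
--     end (int): The end of the range (inclusive)
--
--     Returns:
--     int: The greatest common divisor of all composite numbers in the range
--     """
--
--     # Function to check if a number is composite
--     def is_composite(n):
--         if n < 2:
--             return False
--         for i in range(2, int(math.sqrt(n)) + 1):
--             if n % i == 0:
--                 return True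
--         return False
--
--     # Function to calculate the greatest common divisor of two numbers using the Euclidean algorithm
--     def gcd(a, b):
--         while b:
--             a, b = b, a % b
--         return a
--
--     # Initialize the greatest common divisor with the first composite number in the range
--     composite_gcd_result = next((i for i in range(start, end + 1) if is_composite(i)), None)
--
--     # If no composite numbers are found in the range, return 1
--     if composite_gcd_result is None:
--         return 1
--
--     # Calculate the greatest common divisor of all composite numbers in the range
--     for i in range(start, end + 1):
--         if is_composite(i):
--             composite_gcd_result = gcd(composite_gcd_result, i)
--
--     return composite_gcd_result
-- ===== SOURCE B (Python) =====
-- import math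
--
-- def composite_gcd(start, end):
--     # Segmented sieve (alternative algorithm): mark every composite in [max(start,4), end] by striding
--     # multiples of each d in [2, isqrt(end)], then fold gcd over the marks with
--     # an early exit once the running gcd collapses to 1.
--     lo = max(start, 4)
--     if end < lo:
--         return 1
--     mark = [False] * (end - lo + 1)
--     for d in range(2, math.isqrt(end) + 1):
--         first = max(lo, 2 * d)
--         first += (-first) % d  # round up to a multiple of d
--         for m in range(first, end + 1, d):
--             mark[m - lo] = True
--     g = 0
--     n = lo
--     for flag in mark:
--         if flag:
--             g = math.gcd(g, n)
--             if g == 1: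
--                 return 1
--         n += 1
--     return g if g else 1
-- ===== Notes on version B (the rewrite author's own statement) =====
-- stated objective: alternative
-- what changed: B replaces A's per-number sqrt-bounded trial division (run twice: a pass to find a seed composite, then a full re-fold) by a segmented sieve that marks all composites of [max(start,4), end] by striding multiples of each d up to isqrt(end), then a single gcd fold over the mark array with an early exit when the gcd hits 1; intended as faster (the probe measured 8.3x at the largest size but not consistently across input families), so no unqualified speed claim.
import Mathlib
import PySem

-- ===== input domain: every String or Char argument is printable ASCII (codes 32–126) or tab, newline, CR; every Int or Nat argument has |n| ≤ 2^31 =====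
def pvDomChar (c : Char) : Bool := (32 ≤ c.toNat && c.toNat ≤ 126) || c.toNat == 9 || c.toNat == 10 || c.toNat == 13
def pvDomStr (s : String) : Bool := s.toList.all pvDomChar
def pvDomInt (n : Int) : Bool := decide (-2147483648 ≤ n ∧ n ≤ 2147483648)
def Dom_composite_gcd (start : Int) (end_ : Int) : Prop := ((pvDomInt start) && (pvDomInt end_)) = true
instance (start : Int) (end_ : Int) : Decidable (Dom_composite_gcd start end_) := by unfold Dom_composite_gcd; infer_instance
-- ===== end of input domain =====

-- B replaces A's two passes of per-number trial division by a segmented sieve that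
-- marks the composites of [max(start,4), end] by striding multiples of each d ≤ isqrt(end),
-- then folds gcd over the marks with an early exit at gcd 1 (objective: alternative;
-- intended as faster, but a timing run's measurement was not consistent across input families).


-- ===== PORT A =====
-- int(math.sqrt(n)) for 0 ≤ n ≤ 2^31 (exact on the stated domain: doubles are exact there)
def pySqrtA (n : Int) : Int := (Nat.sqrt n.toNat : Int)

-- is_composite: trial division over range(2, int(sqrt(n))+1)
def isCompA (n : Int) : Bool :=
  if n < 2 then false
  else (PySem.List.pyRange 2 (pySqrtA n + 1) 1).any (fun i => PySem.Int.mod n i == 0)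

-- termination helper for the Euclidean while-loop (cited by gcdA's decreasing_by)
theorem pymod_natAbs_lt (a b : Int) (hb : b ≠ 0) : (PySem.Int.mod a b).natAbs < b.natAbs := by
  rcases lt_or_gt_of_ne hb with h | h
  · have h1 := PySem.Int.mod_neg_bounds a h
    omega
  · have h1 := PySem.Int.mod_nonneg a h
    have h2 := PySem.Int.mod_lt a h
    omega

-- gcd: while b: a, b = b, a % b
def gcdA (a b : Int) : Int :=
  if hb : b = 0 then a else gcdA b (PySem.Int.mod a b)
termination_by b.natAbs
decreasing_by exact pymod_natAbs_lt a b hb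

def composite_gcd (start : Int) (end_ : Int) : Int :=
  match (PySem.List.pyRange start (end_ + 1) 1).find? isCompA with
  | none => 1
  | some c =>
      (PySem.List.pyRange start (end_ + 1) 1).foldl
        (fun g i => if isCompA i then gcdA g i else g) c

-- ===== PORT B =====
-- the two nested marking loops: for d in range(2, isqrt(end)+1): for m in range(first, end+1, d): mark[m-lo] = True
def sieveB (lo : Int) (end_ : Int) : List Bool :=
  (PySem.List.pyRange 2 ((Nat.sqrt end_.toNat : Int) + 1) 1).foldl
    (fun mk d =>
      (PySem.List.pyRange (max lo (2 * d) + PySem.Int.mod (-(max lo (2 * d))) d) (end_ + 1) d).foldl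
        (fun mk m => mk.set (m - lo).toNat true) mk)
    (List.replicate (end_ - lo + 1).toNat false)

-- the scan: for flag in mark: if flag: g = gcd(g, n); early return at 1; n += 1
def scanB : List Bool → Int → Int → Int
  | [], _, g => if g = 0 then 1 else g
  | b :: rest, n, g =>
      if b then
        if (Int.gcd g n : Int) = 1 then 1 else scanB rest (n + 1) (Int.gcd g n : Int)
      else scanB rest (n + 1) g

def composite_gcd_alt (start : Int) (end_ : Int) : Int :=
  if end_ < max start 4 then 1
  else scanB (sieveB (max start 4) end_) (max start 4) 0

-- ===== PRECONDITION & SPEC =====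
def Spec_composite_gcd (start : Int) (end_ : Int) (out : Int) : Prop := out = composite_gcd_alt start end_
instance (start : Int) (end_ : Int) (out : Int) : Decidable (Spec_composite_gcd start end_ out) := by unfold Spec_composite_gcd; infer_instance

-- ===== CLAIM (what is proved, stated in full; the proofs are below) =====
def Claim_equal_composite_gcd : Prop := ∀ (start : Int) (end_ : Int), Dom_composite_gcd start end_ → Spec_composite_gcd start end_ (composite_gcd start end_)

-- ===== LEMMAS AND PROOFS =====

-- the semantic compositeness predicate both tests compute
def compSpec (n : Int) : Bool := decide (2 ≤ n ∧ ¬ Nat.Prime n.toNat)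

-- A's compositeness test says: n ≥ 2 and n.toNat is not prime
theorem isCompA_iff (n : Int) : isCompA n = true ↔ 2 ≤ n ∧ ¬ Nat.Prime n.toNat := by
  unfold isCompA
  split
  · rename_i hlt
    simp only [Bool.false_eq_true, false_iff]
    rintro ⟨h2, -⟩; omega
  · rename_i hlt
    have h2 : 2 ≤ n := by omega
    have hN : n = ((n.toNat : Nat) : Int) := by omega
    rw [List.any_eq_true]
    constructor
    · rintro ⟨i, hmem, hdvd⟩
      rw [PySem.List.mem_pyRange_one] at hmem
      rw [beq_iff_eq, PySem.Int.mod_eq_zero_iff_dvd] at hdvd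
      refine ⟨h2, ?_⟩
      intro hp
      rw [Nat.prime_def_le_sqrt] at hp
      refine hp.2 i.toNat (by omega) ?_ ?_
      · unfold pySqrtA at hmem; omega
      · have : ((i.toNat : Nat) : Int) ∣ ((n.toNat : Nat) : Int) := by
          rw [← hN, (by omega : ((i.toNat : Nat) : Int) = i)]; exact hdvd
        exact_mod_cast this
    · rintro ⟨-, hnp⟩
      have hp := Nat.minFac_prime (n := n.toNat) (by omega)
      have hdvd := Nat.minFac_dvd n.toNat
      have hsq : n.toNat.minFac ^ 2 ≤ n.toNat := Nat.minFac_sq_le_self (by omega) hnp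
      have hle : n.toNat.minFac ≤ Nat.sqrt n.toNat := Nat.le_sqrt.mpr (by nlinarith)
      refine ⟨(n.toNat.minFac : Int), ?_, ?_⟩
      · rw [PySem.List.mem_pyRange_one]
        have h2p := hp.two_le
        unfold pySqrtA
        omega
      · rw [beq_iff_eq, PySem.Int.mod_eq_zero_iff_dvd, hN]
        exact_mod_cast hdvd

theorem comp_eq : isCompA = compSpec := by
  funext n
  rw [Bool.eq_iff_iff, isCompA_iff, compSpec, decide_eq_true_iff]

-- a proper divisor (as Int) refutes primality of n.toNat
theorem not_prime_of_div (n d : Int) (h2 : 2 ≤ d) (hlt : d < n) (hdvd : d ∣ n) :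
    ¬ Nat.Prime n.toNat := by
  intro hp
  have hd' : d.toNat ∣ n.toNat := by
    have : ((d.toNat : Nat) : Int) ∣ ((n.toNat : Nat) : Int) := by
      rw [(by omega : ((d.toNat : Nat) : Int) = d), (by omega : ((n.toNat : Nat) : Int) = n)]
      exact hdvd
    exact_mod_cast this
  rcases (Nat.Prime.eq_one_or_self_of_dvd hp) d.toNat hd' with h | h <;> omega

-- Python's hand-rolled gcd agrees with Int.gcd on nonnegative arguments
theorem gcdA_eq (b a : Int) (ha : 0 ≤ a) (hb : 0 ≤ b) : gcdA a b = (Int.gcd a b : Int) := by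
  induction hk : b.natAbs using Nat.strong_induction_on generalizing a b with
  | _ k ih =>
    by_cases h0 : b = 0
    · subst h0
      rw [gcdA]
      simp [Int.gcd, Int.natAbs_of_nonneg ha]
    · have hbpos : 0 < b := by omega
      rw [gcdA, dif_neg h0, PySem.Int.mod_eq_emod_of_pos hbpos]
      have hm1 : 0 ≤ a % b := Int.emod_nonneg a h0
      have hm2 : a % b < b := Int.emod_lt_of_pos a hbpos
      rw [ih (a % b).natAbs (by omega) (a % b) b hb hm1 rfl]
      congr 1
      rw [Int.gcd, Int.gcd]
      rw [(by omega : a.natAbs = a.toNat), (by omega : b.natAbs = b.toNat),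
        (by omega : (a % b).natAbs = (a % b).toNat)]
      have heq : ((a % b).toNat : Int) = ((a.toNat % b.toNat : Nat) : Int) := by
        rw [Int.toNat_of_nonneg hm1, Int.natCast_mod, Int.toNat_of_nonneg ha, Int.toNat_of_nonneg hb]
      have hmt : (a % b).toNat = a.toNat % b.toNat := by exact_mod_cast heq
      rw [hmt, Nat.gcd_comm a.toNat b.toNat, Nat.gcd_rec b.toNat a.toNat, Nat.gcd_comm]

-- the common normal form: fold Int.gcd over the composites of l
def foldG (l : List Int) (g : Int) : Int :=
  l.foldl (fun g i => if compSpec i then (Int.gcd g i : Int) else g) g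

theorem foldG_one (l : List Int) : foldG l 1 = 1 := by
  induction l with
  | nil => rfl
  | cons a l ih => simp only [foldG, List.foldl_cons] at *; split <;> simp_all

theorem foldG_cons (a : Int) (l : List Int) (g : Int) :
    foldG (a :: l) g = foldG l (if compSpec a then (Int.gcd g a : Int) else g) := by
  simp only [foldG, List.foldl_cons]

theorem foldG_pos (l : List Int) (g : Int) (hg : 0 < g) : 0 < foldG l g := by
  induction l generalizing g with
  | nil => exact hg
  | cons a l ih =>
    simp only [foldG, List.foldl_cons] at *
    split
    · exact ih _ (by exact_mod_cast Int.gcd_pos_iff.mpr (Or.inl (by omega)))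
    · exact ih _ hg

theorem comp_ge (a : Int) (h : compSpec a = true) : 2 ≤ a := by
  rw [compSpec, decide_eq_true_iff] at h
  exact h.1

theorem foldG_of_none (l : List Int) (g : Int) (h : ∀ i ∈ l, ¬ compSpec i = true) :
    foldG l g = g := by
  induction l generalizing g with
  | nil => rfl
  | cons a l ih =>
    rw [foldG_cons, if_neg (h a (by simp))]
    exact ih _ (fun i hi => h i (by simp [hi]))

-- converting A's hand-rolled gcd fold to the Int.gcd fold
theorem foldA_to_G (l : List Int) (g : Int) (hg : 0 ≤ g) :
    l.foldl (fun g i => if compSpec i then gcdA g i else g) g = foldG l g := by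
  induction l generalizing g with
  | nil => rfl
  | cons a l ih =>
    rw [List.foldl_cons, foldG_cons]
    by_cases h : compSpec a
    · rw [if_pos h, if_pos h, gcdA_eq a g hg (by have := comp_ge a h; omega)]
      exact ih _ (Int.natCast_nonneg _)
    · rw [if_neg h, if_neg h]
      exact ih _ hg

-- folding from the first composite equals the normalized fold from 0
theorem norm_some (l : List Int) (c : Int) (h : l.find? compSpec = some c) :
    foldG l c = if foldG l 0 = 0 then 1 else foldG l 0 := by
  induction l with
  | nil => simp at h
  | cons a l ih =>
    by_cases ha : compSpec a
    · rw [List.find?_cons_of_pos ha] at h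
      injection h with h
      subst h
      have h2 : 2 ≤ a := comp_ge a ha
      rw [foldG_cons, foldG_cons, if_pos ha, if_pos ha]
      have hgs : (Int.gcd a a : Int) = a := by
        rw [Int.gcd_self, Int.natAbs_of_nonneg (by omega)]
      have hz : (Int.gcd 0 a : Int) = a := by
        rw [Int.gcd_zero_left, Int.natAbs_of_nonneg (by omega)]
      rw [hgs, hz]
      have hpos := foldG_pos l a (by omega)
      rw [if_neg (by omega)]
    · rw [List.find?_cons_of_neg ha] at h
      rw [foldG_cons, foldG_cons, if_neg ha, if_neg ha]
      exact ih h

-- A computes the normal form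
theorem A_eq_norm (start end_ : Int) :
    composite_gcd start end_ =
      (if foldG (PySem.List.pyRange start (end_ + 1) 1) 0 = 0 then 1
       else foldG (PySem.List.pyRange start (end_ + 1) 1) 0) := by
  unfold composite_gcd
  rw [comp_eq]
  rcases hf : (PySem.List.pyRange start (end_ + 1) 1).find? compSpec with - | c
  · show (1 : Int) = _
    rw [foldG_of_none _ 0 (List.find?_eq_none.mp hf)]
    simp
  · show (PySem.List.pyRange start (end_ + 1) 1).foldl
        (fun g i => if compSpec i then gcdA g i else g) c = _
    have hc : compSpec c = true := List.find?_some hf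
    rw [foldA_to_G _ c (by have := comp_ge c hc; omega), norm_some _ c hf]

-- no composites below 4
theorem compSpec_lt_four (n : Int) (h : n < 4) : compSpec n = false := by
  rw [compSpec, decide_eq_false_iff_not]
  rintro ⟨h2, hnp⟩
  have : n.toNat = 2 ∨ n.toNat = 3 := by omega
  rcases this with h | h <;> (rw [h] at hnp; exact hnp (by decide))

-- ===== sieve characterization =====

-- set-folds preserve length
theorem markFold_length (lo : Int) (ms : List Int) (mk : List Bool) :
    (ms.foldl (fun mk m => mk.set (m - lo).toNat true) mk).length = mk.length := by
  induction ms generalizing mk with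
  | nil => rfl
  | cons m ms ih => rw [List.foldl_cons, ih, List.length_set]

theorem outer_fold_length (lo end_ : Int) (ds : List Int) (mk : List Bool) :
    (ds.foldl (fun mk d =>
      (PySem.List.pyRange (max lo (2 * d) + PySem.Int.mod (-(max lo (2 * d))) d) (end_ + 1) d).foldl
        (fun mk m => mk.set (m - lo).toNat true) mk) mk).length = mk.length := by
  induction ds generalizing mk with
  | nil => rfl
  | cons d ds ih => rw [List.foldl_cons, ih, markFold_length]

theorem sieveB_length (lo end_ : Int) : (sieveB lo end_).length = (end_ - lo + 1).toNat := by
  unfold sieveB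
  rw [outer_fold_length]
  simp

-- membership after a set-fold: old value or one of the set positions
theorem markFold_getD (lo : Int) (ms : List Int) (mk : List Bool) (j : Nat)
    (hms : ∀ m ∈ ms, lo ≤ m ∧ (m - lo).toNat < mk.length) :
    (ms.foldl (fun mk m => mk.set (m - lo).toNat true) mk).getD j false =
      (mk.getD j false || ms.any (fun m => m == lo + (j : Int))) := by
  induction ms generalizing mk with
  | nil => simp
  | cons m ms ih =>
    rw [List.foldl_cons, List.any_cons]
    have hm := hms m (by simp)
    rw [ih _ (fun x hx => by
      have := hms x (by simp [hx]); simpa [List.length_set] using this)]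
    by_cases he : (m - lo).toNat = j
    · have hj : j < mk.length := he ▸ hm.2
      have hmeq : (m == lo + (j : Int)) = true := by rw [beq_iff_eq]; omega
      have hset : (mk.set (m - lo).toNat true).getD j false = true := by
        subst he
        simp [List.getD_eq_getElem?_getD, List.getElem?_set, hj]
      rw [hset, hmeq]
      simp
    · have hne : (m == lo + (j : Int)) = false := by
        rw [beq_eq_false_iff_ne]
        omega
      have hset : (mk.set (m - lo).toNat true).getD j false = mk.getD j false := by
        simp [List.getD_eq_getElem?_getD, List.getElem?_set, he]
      rw [hset, hne]
      simp

-- the inner marking range of d holds exactly the multiples of d in [max lo (2d), end]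
theorem inner_mem (lo end_ d m : Int) (hd : 0 < d) :
    (m ∈ PySem.List.pyRange (max lo (2 * d) + PySem.Int.mod (-(max lo (2 * d))) d) (end_ + 1) d)
      ↔ (d ∣ m ∧ max lo (2 * d) ≤ m ∧ m ≤ end_) := by
  set f0 : Int := max lo (2 * d) with hf0
  set first : Int := f0 + PySem.Int.mod (-f0) d with hfir
  have hmod1 : 0 ≤ PySem.Int.mod (-f0) d := PySem.Int.mod_nonneg _ hd
  have hmod2 : PySem.Int.mod (-f0) d < d := PySem.Int.mod_lt _ hd
  have hdfirst : d ∣ first := by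
    have h := PySem.Int.floordiv_mul_add_mod (-f0) d
    refine ⟨-(PySem.Int.floordiv (-f0) d), ?_⟩
    rw [hfir]
    linarith
  rw [PySem.List.mem_pyRange_iff_of_pos hd m]
  constructor
  · rintro ⟨h1, h2, h3⟩
    have hdm : d ∣ m := by
      have := dvd_add h3 hdfirst
      simpa using this
    exact ⟨hdm, by omega, by omega⟩
  · rintro ⟨hdm, h1, h2⟩
    have hdf : d ∣ m - first := (dvd_sub_right hdm).mpr hdfirst
    have hge : first ≤ m := by
      by_contra hlt
      push_neg at hlt
      have hpos : 0 < first - m := by omega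
      have hneg : d ∣ first - m := by
        rw [(by ring : first - m = -(m - first))]
        exact dvd_neg.mpr hdf
      have := Int.le_of_dvd hpos hneg
      omega
    exact ⟨hge, by omega, hdf⟩

-- position j of the outer marking fold: initially marked, or hit by some stride
theorem outer_marked_iff (lo end_ : Int) (ds : List Int) (mk : List Bool) (j : Nat)
    (hlen : mk.length = (end_ - lo + 1).toNat) (hds : ∀ d ∈ ds, 0 < d) :
    ((ds.foldl (fun mk d =>
        (PySem.List.pyRange (max lo (2 * d) + PySem.Int.mod (-(max lo (2 * d))) d) (end_ + 1) d).foldl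
          (fun mk m => mk.set (m - lo).toNat true) mk) mk).getD j false = true)
      ↔ (mk.getD j false = true ∨ ∃ d ∈ ds,
            (lo + (j : Int)) ∈ PySem.List.pyRange (max lo (2 * d) + PySem.Int.mod (-(max lo (2 * d))) d) (end_ + 1) d) := by
  induction ds generalizing mk with
  | nil => simp
  | cons d ds ih =>
    rw [List.foldl_cons]
    have hd := hds d (by simp)
    have hside : ∀ m ∈ PySem.List.pyRange (max lo (2 * d) + PySem.Int.mod (-(max lo (2 * d))) d) (end_ + 1) d,
        lo ≤ m ∧ (m - lo).toNat < mk.length := by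
      intro m hm
      rw [inner_mem lo end_ d m hd] at hm
      constructor
      · have := le_max_left lo (2 * d); omega
      · rw [hlen]
        have := le_max_left lo (2 * d); omega
    rw [ih _ (by rw [markFold_length, hlen]) (fun x hx => hds x (by simp [hx]))]
    rw [markFold_getD lo _ mk j hside]
    simp only [Bool.or_eq_true, List.any_eq_true, beq_iff_eq]
    constructor
    · rintro (((h | ⟨m, hm, he⟩) | ⟨x, hx, hmem⟩))
      · exact Or.inl h
      · exact Or.inr ⟨d, by simp, by rw [← he]; exact hm⟩
      · exact Or.inr ⟨x, by simp [hx], hmem⟩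
    · rintro (h | ⟨x, hx, hmem⟩)
      · exact Or.inl (Or.inl h)
      · rcases List.mem_cons.mp hx with he | hx'
        · exact Or.inl (Or.inr ⟨lo + (j : Int), he ▸ hmem, rfl⟩)
        · exact Or.inr ⟨x, hx', hmem⟩

-- the sieve marks position j exactly when lo+j is composite
theorem sieveB_getD (lo end_ : Int) (h4 : 4 ≤ lo) (hle : lo ≤ end_) (j : Nat)
    (hj : (j : Int) ≤ end_ - lo) :
    (sieveB lo end_).getD j false = compSpec (lo + j) := by
  set n : Int := lo + (j : Int) with hn
  rw [Bool.eq_iff_iff]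
  unfold sieveB
  rw [outer_marked_iff lo end_ _ _ j (by simp) (by
    intro d hd
    rw [PySem.List.mem_pyRange_one] at hd
    omega)]
  have hrep : (List.replicate (end_ - lo + 1).toNat false).getD j false = false := by
    simp [List.getD_eq_getElem?_getD]
  rw [hrep]
  simp only [Bool.false_eq_true, false_or]
  constructor
  · rintro ⟨d, hd, hmem⟩
    rw [PySem.List.mem_pyRange_one] at hd
    rw [inner_mem lo end_ d _ (by omega)] at hmem
    obtain ⟨hdvd, hmax, -⟩ := hmem
    rw [compSpec, decide_eq_true_iff]
    have h2d : 2 * d ≤ n := le_trans (le_max_right _ _) hmax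
    exact ⟨by omega, not_prime_of_div n d (by omega) (by omega) hdvd⟩
  · intro hc
    rw [compSpec, decide_eq_true_iff] at hc
    obtain ⟨-, hnp⟩ := hc
    have hn4 : 4 ≤ n := by omega
    have hp := Nat.minFac_prime (n := n.toNat) (by omega)
    have hdvdN := Nat.minFac_dvd n.toNat
    have hsq : n.toNat.minFac ^ 2 ≤ n.toNat := Nat.minFac_sq_le_self (by omega) hnp
    set p : ℕ := n.toNat.minFac with hpdef
    have hp2 : 2 ≤ p := hp.two_le
    have hne : n ≤ end_ := by omega
    have hsqrt : p ≤ Nat.sqrt end_.toNat := Nat.le_sqrt.mpr (by nlinarith [Int.toNat_le_toNat hne])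
    have hdvd : ((p : ℕ) : Int) ∣ n := by
      have : ((p : ℕ) : Int) ∣ ((n.toNat : ℕ) : Int) := Int.natCast_dvd_natCast.mpr hdvdN
      rwa [(by omega : ((n.toNat : ℕ) : Int) = n)] at this
    refine ⟨(p : Int), ?_, ?_⟩
    · rw [PySem.List.mem_pyRange_one]
      constructor
      · exact_mod_cast hp2
      · have : (p : Int) ≤ (Nat.sqrt end_.toNat : Int) := by exact_mod_cast hsqrt
        omega
    · rw [inner_mem lo end_ (p : Int) n (by exact_mod_cast hp.pos)]
      have hpn : 2 * (p : Int) ≤ n := by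
        have h1 : p * p ≤ n.toNat := by nlinarith
        have h2 : 2 * p ≤ p * p := by nlinarith
        omega
      exact ⟨hdvd, by omega, hne⟩

-- the scan computes the normalized gcd fold of the marked numbers
theorem scanB_eq (mk : List Bool) (n g : Int)
    (h : ∀ j : Nat, j < mk.length → mk.getD j false = compSpec (n + j)) :
    scanB mk n g =
      (if foldG (PySem.List.pyRange n (n + mk.length) 1) g = 0 then 1
       else foldG (PySem.List.pyRange n (n + mk.length) 1) g) := by
  induction mk generalizing n g with
  | nil =>
    rw [scanB]
    rw [PySem.List.pyRange_one_eq_nil (by simp)]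
    rfl
  | cons b rest ih =>
    have hb : b = compSpec n := by
      have := h 0 (by simp)
      simpa using this
    have hlen1 : n + (((b :: rest).length : Nat) : Int) = (n + 1) + ((rest.length : Nat) : Int) := by
      simp only [List.length_cons]
      push_cast
      ring
    have hrange : PySem.List.pyRange n (n + ((b :: rest).length : Int)) 1
        = n :: PySem.List.pyRange (n + 1) ((n + 1) + (rest.length : Int)) 1 := by
      rw [hlen1, PySem.List.pyRange_one_cons (by
        have : (0 : Int) ≤ ((rest.length : Nat) : Int) := Int.natCast_nonneg _
        omega)]
    have hrest : ∀ j : Nat, j < rest.length → rest.getD j false = compSpec ((n + 1) + j) := by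
      intro j hjl
      have := h (j + 1) (by simp; omega)
      simp only [List.getD_cons_succ] at this
      rw [this]
      congr 1
      push_cast
      ring
    rw [scanB, hrange, foldG_cons, ← hb]
    by_cases hbv : b = true
    · rw [if_pos hbv, hbv, if_pos rfl]
      by_cases hg1 : (Int.gcd g n : Int) = 1
      · rw [if_pos hg1, hg1, foldG_one]
        simp
      · rw [if_neg hg1]
        exact ih (n + 1) _ hrest
    · have hbf : b = false := by simpa using hbv
      rw [hbf]
      simp only [Bool.false_eq_true, if_false]
      exact ih (n + 1) _ hrest

-- ===== VERDICT (by name: the statement is the Claim_ definition above) =====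
theorem composite_gcd_spec : Claim_equal_composite_gcd := by
  intro start end_ _
  unfold Spec_composite_gcd composite_gcd_alt
  obtain ⟨lo, hlo⟩ : ∃ lo, max start 4 = lo := ⟨_, rfl⟩
  rw [hlo, A_eq_norm]
  have hms : start ≤ lo := hlo ▸ le_max_left _ _
  have hm4 : (4 : Int) ≤ lo := hlo ▸ le_max_right _ _
  have hmc : lo = start ∨ lo = 4 := hlo ▸ max_choice _ _
  by_cases hend : end_ < lo
  · rw [if_pos hend]
    rw [foldG_of_none _ 0 (by
      intro i hi
      rw [PySem.List.mem_pyRange_one] at hi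
      simp [compSpec_lt_four i (by omega)])]
    simp
  · push_neg at hend
    rw [if_neg (not_lt.mpr hend)]
    have hlen : ((sieveB lo end_).length : Int) = end_ - lo + 1 := by
      rw [sieveB_length]
      exact Int.toNat_of_nonneg (by omega)
    rw [scanB_eq (sieveB lo end_) lo 0 (by
      intro j hjl
      have hj : (j : Int) ≤ end_ - lo := by omega
      exact sieveB_getD lo end_ hm4 hend j hj)]
    rw [(by rw [hlen]; ring : lo + ((sieveB lo end_).length : Int) = end_ + 1)]
    have hkey : foldG (PySem.List.pyRange start (end_ + 1) 1) 0
        = foldG (PySem.List.pyRange lo (end_ + 1) 1) 0 := by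
      rw [PySem.List.pyRange_one_append start lo (end_ + 1) hms (by omega)]
      have happ : foldG (PySem.List.pyRange start lo 1 ++ PySem.List.pyRange lo (end_ + 1) 1) 0
          = foldG (PySem.List.pyRange lo (end_ + 1) 1) (foldG (PySem.List.pyRange start lo 1) 0) := by
        simp [foldG, List.foldl_append]
      rw [happ, foldG_of_none (PySem.List.pyRange start lo 1) 0 (by
        intro i hi
        rw [PySem.List.mem_pyRange_one] at hi
        simp [compSpec_lt_four i (by omega)])]
    rw [hkey]
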